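-- pv_equiv track=rewrite | github.com/Ozpl/Python-Magic-Collection | modules/database/functions.py | sort_key_colors_mapping
-- ===== SOURCE A (Python) =====
-- def sort_key_colors_mapping(array: list, color_map: dict) -> str:
--     '''Helper function to sort_key generation, used for assigning numeral value to given color combination.'''
--     for element in color_map:
--         found_colors = 0
--         for char in element:
--             if char in array:
--                 found_colors = found_colors + 1
--                 if found_colors == len(array):
--                     return color_map[element]
--             else:
--                 found_colors = 0
--                 continue
--     return '35'
-- ===== SOURCE B (Python) =====
-- def sort_key_colors_mapping(array: list, color_map: dict) -> str:
--     '''Assign the numeral code of the first color-combination key that contains a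
--     contiguous window of len(array) characters all belonging to array; else '35'.
--     Re-implementation: per-position whole-window test over shrinking suffixes
--     instead of A's resetting running counter.'''
--     n = len(array)
--     if n:
--         for element, value in color_map.items():
--             s = element
--             while n <= len(s):
--                 if all(c in array for c in s[:n]):
--                     return value
--                 s = s[1:]
--     return '35'
-- ===== Notes on version B (the rewrite author's own statement) =====
-- stated objective: alternative
-- what changed: Replaces A's single-pass resetting run counter with a per-position whole-window membership test over shrinking suffixes; the n <= len(s) loop guard skips keys shorter than len(array) without scanning them, where A still runs an O(len(array)) membership test per character.
import Mathlib
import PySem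

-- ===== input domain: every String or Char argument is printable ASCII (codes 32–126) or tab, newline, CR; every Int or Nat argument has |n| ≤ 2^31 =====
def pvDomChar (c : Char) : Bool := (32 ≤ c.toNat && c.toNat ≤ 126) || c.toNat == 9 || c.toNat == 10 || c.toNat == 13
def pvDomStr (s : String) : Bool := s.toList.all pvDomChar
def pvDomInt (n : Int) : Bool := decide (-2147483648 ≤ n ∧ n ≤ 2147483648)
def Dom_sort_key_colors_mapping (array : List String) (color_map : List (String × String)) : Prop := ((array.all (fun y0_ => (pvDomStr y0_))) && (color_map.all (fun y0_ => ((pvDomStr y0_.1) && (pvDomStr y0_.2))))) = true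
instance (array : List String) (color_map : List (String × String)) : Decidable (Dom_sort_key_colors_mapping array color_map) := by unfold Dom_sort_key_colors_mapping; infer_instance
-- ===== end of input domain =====

-- B replaces A's resetting run counter by a per-position whole-window membership test
-- over shrinking suffixes (objective: alternative decomposition, same asymptotic cost).

-- `char in array`: a one-character string tested for membership in the list of strings
def pvMemA (array : List String) (c : Char) : Bool := array.contains (String.ofList [c])

-- ===== PORT A =====
-- inner `for char in element` loop with its resetting counter; `true` = the early return fired
def pvAInner (array : List String) : List Char → Nat → Bool
  | [], _ => false
  | c :: rest, cnt =>
    if pvMemA array c then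
      if cnt + 1 = array.length then true else pvAInner array rest (cnt + 1)
    else
      pvAInner array rest 0

-- outer `for element in color_map` loop; `color_map[element]` is `d.get? k`
-- (KeyError impossible: k is one of the dict's keys, so `.getD "35"` is never taken)
def pvAOuter (array : List String) (d : PySem.Dict String String) : List String → String
  | [] => "35"
  | k :: rest =>
    if pvAInner array k.toList 0 then (d.get? k).getD "35" else pvAOuter array d rest

def sort_key_colors_mapping (array : List String) (color_map : List (String × String)) : String :=
  let d := PySem.Dict.ofList color_map
  pvAOuter array d d.keys

-- ===== PORT B =====
-- the `while n <= len(s): if all(c in array for c in s[:n]): return value; s = s[1:]`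
-- loop, as structural recursion on the suffix (on [] the loop runs iff n = 0,
-- and then `all` over the empty slice returns True at once)
def pvBHas (array : List String) (n : Nat) : List Char → Bool
  | [] => decide (n = 0)
  | c :: rest =>
    decide (n ≤ rest.length + 1) && (((c :: rest).take n).all (pvMemA array) || pvBHas array n rest)

-- `for element, value in color_map.items()`
def pvBOuter (array : List String) (n : Nat) : List (String × String) → String
  | [] => "35"
  | (k, v) :: rest => if pvBHas array n k.toList then v else pvBOuter array n rest

def sort_key_colors_mapping_alt (array : List String) (color_map : List (String × String)) : String :=
  let n := array.length
  if n = 0 then "35" else pvBOuter array n (PySem.Dict.ofList color_map).items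

-- ===== PRECONDITION & SPEC =====
def Spec_sort_key_colors_mapping (array : List String) (color_map : List (String × String)) (out : String) : Prop := out = sort_key_colors_mapping_alt array color_map
instance (array : List String) (color_map : List (String × String)) (out : String) : Decidable (Spec_sort_key_colors_mapping array color_map out) := by unfold Spec_sort_key_colors_mapping; infer_instance

-- ===== CLAIM (what is proved, stated in full; the proofs are below) =====
def Claim_equal_sort_key_colors_mapping : Prop := ∀ (array : List String) (color_map : List (String × String)), Dom_sort_key_colors_mapping array color_map → Spec_sort_key_colors_mapping array color_map (sort_key_colors_mapping array color_map)

-- ===== LEMMAS AND PROOFS =====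

-- "some suffix of s starts with n consecutive members": window check at one position
def pvPrefOK (array : List String) (n : Nat) (s : List Char) : Bool :=
  decide (n ≤ s.length) && (s.take n).all (pvMemA array)

theorem pvBHas_short (array : List String) (n : Nat) :
    ∀ s : List Char, s.length < n → pvBHas array n s = false := by
  intro s
  induction s with
  | nil => intro h; simp [pvBHas]; omega
  | cons c rest ih =>
    intro h
    simp only [pvBHas, List.length_cons] at *
    have h1 : ¬ (n ≤ rest.length + 1) := by omega
    simp [h1]

theorem pvBHas_cons (array : List String) (n : Nat) (c : Char) (rest : List Char) :
    pvBHas array n (c :: rest) = (pvPrefOK array n (c :: rest) || pvBHas array n rest) := by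
  by_cases h : n ≤ rest.length + 1
  · simp [pvBHas, pvPrefOK, h]
  · have h2 : rest.length < n := by omega
    simp [pvBHas, pvPrefOK, h, pvBHas_short array n rest h2]

theorem pvPrefOK_mono (array : List String) {k m : Nat} (s : List Char) (hkm : k ≤ m)
    (h : pvPrefOK array m s = true) : pvPrefOK array k s = true := by
  simp only [pvPrefOK, Bool.and_eq_true, decide_eq_true_eq, List.all_eq_true] at *
  refine ⟨by omega, fun x hx => h.2 x ?_⟩
  have : s.take k = (s.take m).take k := by rw [List.take_take, Nat.min_eq_left hkm]
  rw [this] at hx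
  exact List.take_subset _ _ hx

theorem pvPrefOK_imp_pvBHas (array : List String) {n : Nat} (hn : 1 ≤ n) (s : List Char)
    (h : pvPrefOK array n s = true) : pvBHas array n s = true := by
  cases s with
  | nil =>
    exfalso
    simp [pvPrefOK] at h
    omega
  | cons c rest => rw [pvBHas_cons]; simp [h]

-- the resetting-counter inner loop equals "window at the first n-cnt chars, or a window later on"
theorem pvAInner_eq (array : List String) (hn : 1 ≤ array.length) :
    ∀ (s : List Char) (cnt : Nat), cnt < array.length →
      pvAInner array s cnt
        = (pvPrefOK array (array.length - cnt) s || pvBHas array array.length s) := by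
  intro s
  induction s with
  | nil =>
    intro cnt hcnt
    have h1 : ¬ (array.length - cnt ≤ 0) := by omega
    have h2 : ¬ (array.length = 0) := by omega
    simp [pvAInner, pvPrefOK, pvBHas, h1, h2]
  | cons c rest ih =>
    intro cnt hcnt
    rw [pvBHas_cons]
    by_cases hc : pvMemA array c = true
    · by_cases heq : cnt + 1 = array.length
      · have h1 : array.length - cnt = 1 := by omega
        simp [pvAInner, hc, heq, pvPrefOK, h1]
      · have hlt : cnt + 1 < array.length := by omega
        have step : pvAInner array (c :: rest) cnt = pvAInner array rest (cnt + 1) := by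
          simp [pvAInner, hc, heq]
        rw [step, ih (cnt + 1) hlt]
        -- pvPrefOK (n-cnt) (c::rest) = pvPrefOK (n-cnt-1) rest  (c passes; n-cnt ≥ 1)
        have hpk : pvPrefOK array (array.length - cnt) (c :: rest)
            = pvPrefOK array (array.length - (cnt + 1)) rest := by
          have h1 : array.length - cnt = (array.length - (cnt + 1)) + 1 := by omega
          simp [pvPrefOK, h1, List.take_succ_cons, hc]
        rw [hpk]
        -- absorb the extra pvPrefOK n (c::rest) disjunct via monotonicity
        by_cases hw : pvPrefOK array array.length (c :: rest) = true
        · have hrest : pvPrefOK array (array.length - (cnt + 1)) rest = true := by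
            have hm := pvPrefOK_mono array (s := c :: rest)
              (k := array.length - cnt) (m := array.length) (by omega) hw
            rw [hpk] at hm; exact hm
          simp [hrest, hw]
        · have hw' : pvPrefOK array array.length (c :: rest) = false := by simpa using hw
          simp [hw']
    · have hc' : pvMemA array c = false := by simpa using hc
      have h0 : (0 : Nat) < array.length := hn
      have step : pvAInner array (c :: rest) cnt = pvAInner array rest 0 := by
        simp [pvAInner, hc']
      rw [step, ih 0 h0]
      have hpf : pvPrefOK array (array.length - cnt) (c :: rest) = false := by
        have h1 : ∃ m, array.length - cnt = m + 1 := ⟨array.length - cnt - 1, by omega⟩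
        obtain ⟨m, hm⟩ := h1
        simp [pvPrefOK, hm, List.take_succ_cons, hc']
      have hpf2 : pvPrefOK array array.length (c :: rest) = false := by
        have h1 : ∃ m, array.length = m + 1 := ⟨array.length - 1, by omega⟩
        obtain ⟨m, hm⟩ := h1
        simp [pvPrefOK, hm, List.take_succ_cons, hc']
      rw [hpf, hpf2]
      simp only [Nat.sub_zero, Bool.false_or]
      cases h : pvPrefOK array array.length rest
      · simp
      · simp [pvPrefOK_imp_pvBHas array hn rest h]

theorem pvAInner_zero (array : List String) (h : array.length = 0) :
    ∀ (s : List Char) (cnt : Nat), pvAInner array s cnt = false := by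
  have harr : array = [] := List.length_eq_zero_iff.mp h
  subst harr
  intro s
  induction s with
  | nil => intro cnt; simp [pvAInner]
  | cons c rest ih => intro cnt; simp [pvAInner, pvMemA, ih]

theorem pvOuter_eq (array : List String) (hn : 1 ≤ array.length)
    (d : PySem.Dict String String) :
    ∀ l : List (String × String), (∀ p ∈ l, d.get? p.1 = some p.2) →
      pvAOuter array d (l.map (·.1)) = pvBOuter array array.length l := by
  intro l
  induction l with
  | nil => intro _; rfl
  | cons p rest ih =>
    intro hl
    obtain ⟨k, v⟩ := p
    have hk : d.get? k = some v := hl (k, v) (List.mem_cons_self)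
    have hinner : pvAInner array k.toList 0 = pvBHas array array.length k.toList := by
      rw [pvAInner_eq array hn k.toList 0 (by omega)]
      simp only [Nat.sub_zero]
      cases h : pvPrefOK array array.length k.toList
      · simp
      · simp [pvPrefOK_imp_pvBHas array hn _ h]
    simp only [List.map_cons, pvAOuter, pvBOuter, hinner, hk]
    cases h : pvBHas array array.length k.toList
    · simp [ih (fun q hq => hl q (List.mem_cons_of_mem _ hq))]
    · simp [Option.getD]

-- ===== VERDICT (by name: the statement is the Claim_ definition above) =====
theorem sort_key_colors_mapping_spec : Claim_equal_sort_key_colors_mapping := by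
  intro array color_map _
  unfold Spec_sort_key_colors_mapping sort_key_colors_mapping sort_key_colors_mapping_alt
  by_cases h0 : array.length = 0
  · -- A never fires with an empty array: every key fails the inner loop
    simp only [h0]
    generalize (PySem.Dict.ofList color_map).keys = ks
    induction ks with
    | nil => rfl
    | cons k rest ih => simpa [pvAOuter, pvAInner_zero array h0] using ih
  · have hn : 1 ≤ array.length := by omega
    simp only [if_neg h0]
    have hnd : (PySem.Dict.ofList color_map).keys.Nodup := PySem.Dict.nodup_keys_ofList _
    have hkeys : (PySem.Dict.ofList color_map).keys
        = (PySem.Dict.ofList color_map).items.map (·.1) := rfl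
    rw [hkeys]
    exact pvOuter_eq array hn _ _
      (fun p hp => by
        have := PySem.Dict.get?_of_mem_items (d := PySem.Dict.ofList color_map)
          (k := p.1) (v := p.2) (by simpa using hp) hnd
        exact this)
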